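-- pv_equiv track=rewrite | github.com/Heffri/University | Programming_techniques/LABB2/LABB2.py | sub_poly
-- ===== SOURCE A (Python) =====
-- def sub_poly(p_list, q_list):
--     sub_poly_list = []  # Creates list to save the added lists
--     max_length = max(len(p_list), len(q_list))
--
--     for i in range(max_length):
--         if i < len(p_list) and i < len(q_list):
--             # p_list & q_list index i
--             sub_poly_list.append(p_list[i] - q_list[i])
--         elif i < len(p_list):
--             # p_list index i
--             sub_poly_list.append(p_list[i])
--         elif i < len(q_list):
--             # q_list index i
--             sub_poly_list.append(q_list[i])
--
--     return sub_poly_list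
-- ===== SOURCE B (Python) =====
-- def sub_poly(p_list, q_list):
--     # Back-to-front: pop the longer list's overhang onto the output, then
--     # pop matched pairs off both ends, and reverse once at the end.
--     ps, qs = list(p_list), list(q_list)
--     out = []
--     while len(ps) > len(qs):
--         out.append(ps.pop())
--     while len(qs) > len(ps):
--         out.append(qs.pop())          # q-only overhang stays positive, as A returns it
--     while ps:
--         out.append(ps.pop() - qs.pop())
--     out.reverse()
--     return out
-- ===== Notes on version B (the rewrite author's own statement) =====
-- stated objective: alternative
-- what changed: Instead of A's forward index loop over range(max(len,len)) with three per-index bound tests, B builds the result back-to-front: it pops the longer list's overhang onto the output (the q-only overhang kept positive, as A returns it), then pops matched pairs off both ends subtracting them, and reverses once; it trades index arithmetic for stack consumption of list copies.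
import Mathlib
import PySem

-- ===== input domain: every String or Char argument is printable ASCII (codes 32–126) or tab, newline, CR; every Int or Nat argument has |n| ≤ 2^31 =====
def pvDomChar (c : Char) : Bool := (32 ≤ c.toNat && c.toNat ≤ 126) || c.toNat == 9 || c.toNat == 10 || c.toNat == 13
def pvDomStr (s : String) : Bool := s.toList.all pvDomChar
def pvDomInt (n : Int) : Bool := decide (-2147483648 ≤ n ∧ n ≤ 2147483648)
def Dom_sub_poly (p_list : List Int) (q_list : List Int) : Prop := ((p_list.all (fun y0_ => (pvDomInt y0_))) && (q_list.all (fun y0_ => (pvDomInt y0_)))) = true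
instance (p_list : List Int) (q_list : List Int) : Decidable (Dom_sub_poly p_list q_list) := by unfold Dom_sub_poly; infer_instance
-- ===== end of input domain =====

-- B builds the result back-to-front by popping the longer list's overhang and then matched pairs off the ends of list copies, reversing once (alternative decomposition; q-only overhang kept positive, as A returns it).
-- ===== PORT A =====
def sub_poly (p_list : List Int) (q_list : List Int) : List Int :=
  let max_length := max p_list.length q_list.length
  (List.range max_length).foldl (fun sub_poly_list i =>
    if i < p_list.length ∧ i < q_list.length then
      sub_poly_list ++ [p_list.getD i 0 - q_list.getD i 0]
    else if i < p_list.length then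
      sub_poly_list ++ [p_list.getD i 0]
    else if i < q_list.length then
      sub_poly_list ++ [q_list.getD i 0]
    else sub_poly_list) []

-- ===== PORT B =====
-- while len(xs) > n: out.append(xs.pop())   (n is the other list's length, fixed during the loop)
def popWhile (xs : List Int) (n : Nat) (out : List Int) : List Int × List Int :=
  if xs.length > n then popWhile xs.dropLast n (out ++ [xs.getLastD 0]) else (xs, out)
termination_by xs.length
decreasing_by simp [List.length_dropLast]; omega

-- while ps: out.append(ps.pop() - qs.pop())
def subLoop (ps qs out : List Int) : List Int :=
  if ps = [] then out
  else subLoop ps.dropLast qs.dropLast (out ++ [ps.getLastD 0 - qs.getLastD 0])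
termination_by ps.length
decreasing_by
  simp only [List.length_dropLast]
  have hne : ps ≠ [] := by assumption
  have := List.length_pos_of_ne_nil hne
  omega

def sub_poly_alt (p_list : List Int) (q_list : List Int) : List Int :=
  let s1 := popWhile p_list q_list.length []
  let s2 := popWhile q_list s1.1.length s1.2
  (subLoop s1.1 s2.1 s2.2).reverse

-- ===== PRECONDITION & SPEC =====
def Spec_sub_poly (p_list : List Int) (q_list : List Int) (out : List Int) : Prop := out = sub_poly_alt p_list q_list
instance (p_list : List Int) (q_list : List Int) (out : List Int) : Decidable (Spec_sub_poly p_list q_list out) := by unfold Spec_sub_poly; infer_instance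

-- ===== CLAIM (what is proved, stated in full; the proofs are below) =====
def Claim_equal_sub_poly : Prop := ∀ (p_list : List Int) (q_list : List Int), Dom_sub_poly p_list q_list → Spec_sub_poly p_list q_list (sub_poly p_list q_list)

-- ===== LEMMAS AND PROOFS =====
-- element produced by A at index i
def gA (p_list q_list : List Int) (i : Nat) : Int :=
  if i < p_list.length ∧ i < q_list.length then p_list.getD i 0 - q_list.getD i 0
  else if i < p_list.length then p_list.getD i 0
  else q_list.getD i 0

theorem foldl_snoc (g : Nat → Int) : ∀ (l : List Nat) (acc : List Int),
    l.foldl (fun a i => a ++ [g i]) acc = acc ++ l.map g := by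
  intro l
  induction l with
  | nil => simp
  | cons x xs ih => intro acc; simp [List.foldl, ih]

theorem A_eq_map (p_list q_list : List Int) :
    sub_poly p_list q_list =
      (List.range (max p_list.length q_list.length)).map (gA p_list q_list) := by
  unfold sub_poly
  have h : ∀ acc, (List.range (max p_list.length q_list.length)).foldl
      (fun sub_poly_list i =>
        if i < p_list.length ∧ i < q_list.length then
          sub_poly_list ++ [p_list.getD i 0 - q_list.getD i 0]
        else if i < p_list.length then
          sub_poly_list ++ [p_list.getD i 0]
        else if i < q_list.length then
          sub_poly_list ++ [q_list.getD i 0]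
        else sub_poly_list) acc
      = (List.range (max p_list.length q_list.length)).foldl
        (fun a i => a ++ [gA p_list q_list i]) acc := by
    intro acc
    apply PySem.List.foldl_congr_mem
    intro a i hi
    have hi' : i < max p_list.length q_list.length := List.mem_range.mp hi
    unfold gA
    by_cases h1 : i < p_list.length <;> by_cases h2 : i < q_list.length <;>
      simp [h1, h2]; omega
  simp only [h, foldl_snoc, List.nil_append]

theorem popWhile_eq (xs : List Int) : ∀ (n : Nat) (out : List Int),
    popWhile xs n out = (xs.take n, out ++ (xs.drop n).reverse) := by
  induction xs using List.reverseRecOn with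
  | nil => intro n out; rw [popWhile]; simp
  | append_singleton ys a ih =>
    intro n out
    rw [popWhile]
    by_cases h : (ys ++ [a]).length > n
    · rw [if_pos h]
      have hn : n ≤ ys.length := by simp at h; omega
      simp [ih, List.take_append_of_le_length hn, List.drop_append_of_le_length hn]
    · rw [if_neg h]
      have hn : ys.length + 1 ≤ n := by simp at h; omega
      rw [List.take_of_length_le (by simp; omega), List.drop_eq_nil_of_le (by simp; omega)]
      simp

theorem subLoop_eq : ∀ (ps qs out : List Int), ps.length = qs.length →
    subLoop ps qs out = out ++ (List.zipWith (· - ·) ps qs).reverse := by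
  intro ps qs out
  induction ps, qs, out using subLoop.induct with
  | case1 qs out =>
    intro h
    rw [subLoop]
    have : qs = [] := List.eq_nil_of_length_eq_zero (by simpa using h.symm)
    simp [this]
  | case2 ps qs out hne ih =>
    intro h
    rw [subLoop, if_neg hne]
    have hq : qs ≠ [] := by
      intro he; apply hne; subst he; rw [List.length_nil] at h
      exact List.eq_nil_of_length_eq_zero h
    have hlen : ps.dropLast.length = qs.dropLast.length := by
      simp [List.length_dropLast]; omega
    rw [ih hlen]
    have hz : List.zipWith (· - ·) ps qs
        = List.zipWith (· - ·) ps.dropLast qs.dropLast ++ [ps.getLastD 0 - qs.getLastD 0] := by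
      have e1 : ps.getLastD 0 = ps.getLast hne := by
        simp [List.getLastD_eq_getLast?, List.getLast?_eq_some_getLast hne]
      have e2 : qs.getLastD 0 = qs.getLast hq := by
        simp [List.getLastD_eq_getLast?, List.getLast?_eq_some_getLast hq]
      conv_lhs => rw [← List.dropLast_concat_getLast hne, ← List.dropLast_concat_getLast hq]
      rw [List.zipWith_append hlen, e1, e2]
      rfl
    rw [hz]
    simp

theorem zip_take_right (p q : List Int) :
    List.zipWith (· - ·) p (q.take p.length) = List.zipWith (· - ·) p q := by
  calc List.zipWith (· - ·) p (q.take p.length)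
      = List.zipWith (· - ·) (p.take p.length) (q.take p.length) := by rw [List.take_length]
    _ = (List.zipWith (· - ·) p q).take p.length := (List.take_zipWith).symm
    _ = List.zipWith (· - ·) p q := List.take_of_length_le (by simp)

theorem zip_take_left (p q : List Int) :
    List.zipWith (· - ·) (p.take q.length) q = List.zipWith (· - ·) p q := by
  calc List.zipWith (· - ·) (p.take q.length) q
      = List.zipWith (· - ·) (p.take q.length) (q.take q.length) := by rw [List.take_length]
    _ = (List.zipWith (· - ·) p q).take q.length := (List.take_zipWith).symm
    _ = List.zipWith (· - ·) p q := List.take_of_length_le (by simp)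

theorem B_char (p_list q_list : List Int) :
    sub_poly_alt p_list q_list =
      List.zipWith (· - ·) p_list q_list
        ++ p_list.drop q_list.length ++ q_list.drop p_list.length := by
  unfold sub_poly_alt
  simp only [popWhile_eq]
  rcases Nat.le_total p_list.length q_list.length with hle | hle
  · rw [List.take_of_length_le hle, List.drop_eq_nil_of_le hle]
    rw [subLoop_eq _ _ _ (by simp; omega)]
    simp [zip_take_right]
  · have hmin : min q_list.length p_list.length = q_list.length := Nat.min_eq_left hle
    rw [subLoop_eq _ _ _ (by simp)]
    rw [List.length_take, hmin, List.take_length, List.drop_length,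
      List.drop_eq_nil_of_le hle]
    simp [zip_take_left]

theorem zip_eq_map_range (p_list q_list : List Int) :
    List.zipWith (· - ·) p_list q_list =
      (List.range (min p_list.length q_list.length)).map
        (fun i => p_list.getD i 0 - q_list.getD i 0) := by
  apply List.ext_getElem (by simp)
  intro i h1 h2
  simp only [List.getElem_zipWith, List.getElem_map, List.getElem_range]
  have hp : i < p_list.length := by simp at h1; omega
  have hq : i < q_list.length := by simp at h1; omega
  rw [List.getD_eq_getElem _ _ hp, List.getD_eq_getElem _ _ hq]

theorem B_char' (p_list q_list : List Int) :
    sub_poly_alt p_list q_list =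
      ((List.range (min p_list.length q_list.length)).map
          (fun i => p_list.getD i 0 - q_list.getD i 0))
        ++ p_list.drop (min p_list.length q_list.length)
        ++ q_list.drop (min p_list.length q_list.length) := by
  rw [B_char, zip_eq_map_range]
  rcases Nat.le_total p_list.length q_list.length with hle | hle
  · rw [Nat.min_eq_left hle, List.drop_eq_nil_of_le hle, List.drop_length]
  · rw [Nat.min_eq_right hle, List.drop_eq_nil_of_le hle, List.drop_length]

theorem getElem?_range' (n i : Nat) : (List.range n)[i]? = if i < n then some i else none := by
  split
  · rw [List.getElem?_eq_getElem (by simpa)]; simp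
  · exact List.getElem?_eq_none (by simpa using Nat.le_of_not_lt ‹_›)

-- ===== VERDICT (by name: the statement is the Claim_ definition above) =====
theorem sub_poly_spec : Claim_equal_sub_poly := by
  intro p_list q_list _
  unfold Spec_sub_poly
  rw [A_eq_map, B_char']
  apply List.ext_getElem?
  intro i
  simp only [List.getElem?_map, getElem?_range', List.getElem?_append, List.length_map,
    List.length_range, List.getElem?_drop]
  by_cases hp : i < p_list.length <;> by_cases hq : i < q_list.length
  · simp [gA, hp, hq, List.getD_eq_getElem?_getD]
  · simp [gA, hp, hq, List.getD_eq_getElem?_getD]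
    rw [show min p_list.length q_list.length + (i - min p_list.length q_list.length) = i from by
      omega]
    exact (List.getElem?_eq_getElem hp).symm
  · simp [gA, hp, hq, List.getD_eq_getElem?_getD]
    rw [show min p_list.length q_list.length + (i - p_list.length) = i from by omega]
    exact (List.getElem?_eq_getElem hq).symm
  · simp [hp, hq, List.getD_eq_getElem?_getD]
    omega
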